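-- pv_equiv track=rewrite | github.com/wbird0606/BirdEye-SQL | main.py | _tokenize_relaxed
-- ===== SOURCE A (Python) =====
-- class _RelaxedParserError(ValueError):
--     pass
--
-- def _tokenize_relaxed(raw):
--     tokens = []
--     i = 0
--     n = len(raw)
--     punct = "{}[]:,"
--
--     while i < n:
--         ch = raw[i]
--         if ch.isspace():
--             i += 1
--             continue
--
--         if ch in punct:
--             tokens.append((ch, ch))
--             i += 1
--             continue
--
--         if ch in ('"', "'"):
--             quote = ch
--             i += 1
--             buf = []
--             while i < n:
--                 c = raw[i]
--                 if c == "\\" and i + 1 < n: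
--                     buf.append(raw[i + 1])
--                     i += 2
--                     continue
--                 if c == quote:
--                     i += 1
--                     break
--                 buf.append(c)
--                 i += 1
--             else:
--                 raise _RelaxedParserError("Unterminated quoted string")
--             tokens.append(("STRING", "".join(buf)))
--             continue
--
--         j = i
--         while j < n and (not raw[j].isspace()) and raw[j] not in punct:
--             j += 1
--         tokens.append(("BARE", raw[i:j]))
--         i = j
--
--     return tokens
-- ===== SOURCE B (Python) =====
-- class _RelaxedParserError(ValueError):
--     pass
--
-- _PUNCT = "{}[]:,"
--
-- def _tokenize_relaxed(raw):
--     # single-pass state machine over characters (no index arithmetic, no slicing)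
--     tokens = []
--     mode = 'N'          # 'N' normal, 'S' inside string, 'E' just after backslash
--     quote = ''
--     buf = []            # current string-literal contents
--     bare = []           # current bare run
--     for ch in raw:
--         if mode == 'E':
--             buf.append(ch)
--             mode = 'S'
--         elif mode == 'S':
--             if ch == '\\':
--                 mode = 'E'
--             elif ch == quote:
--                 tokens.append(("STRING", "".join(buf)))
--                 mode = 'N'
--             else:
--                 buf.append(ch)
--         else:
--             if ch.isspace() or ch in _PUNCT:
--                 if bare:
--                     tokens.append(("BARE", "".join(bare)))
--                     bare = []
--                 if ch in _PUNCT: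
--                     tokens.append((ch, ch))
--             elif not bare and ch in ('"', "'"):
--                 mode = 'S'
--                 quote = ch
--                 buf = []
--             else:
--                 bare.append(ch)
--     if mode != 'N':
--         raise _RelaxedParserError("Unterminated quoted string")
--     if bare:
--         tokens.append(("BARE", "".join(bare)))
--     return tokens
-- ===== Notes on version B (the rewrite author's own statement) =====
-- stated objective: alternative
-- what changed: A's index-based while loops with an inner string-scanning loop and slice-based bare runs are replaced by a single character-by-character state-machine pass (normal / in-string / after-backslash) that accumulates the current string or bare run and flushes tokens at boundaries.
import Mathlib
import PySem

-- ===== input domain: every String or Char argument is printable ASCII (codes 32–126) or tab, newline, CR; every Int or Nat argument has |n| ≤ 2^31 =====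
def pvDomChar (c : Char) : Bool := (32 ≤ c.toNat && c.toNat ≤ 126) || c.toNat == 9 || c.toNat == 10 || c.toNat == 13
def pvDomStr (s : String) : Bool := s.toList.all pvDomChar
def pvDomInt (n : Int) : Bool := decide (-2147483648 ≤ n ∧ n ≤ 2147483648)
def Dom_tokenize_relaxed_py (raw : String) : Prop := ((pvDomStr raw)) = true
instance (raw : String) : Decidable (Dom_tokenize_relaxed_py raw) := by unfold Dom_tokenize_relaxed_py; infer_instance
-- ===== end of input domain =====

-- B replaces A's index-driven while loops with a single character-by-character state-machine pass
-- (objective: alternative structure, same linear cost).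

-- ===== PORT A =====
-- A's punctuation string "{}[]:," as a list of chars
def pvPunct : List Char := ['{', '}', '[', ']', ':', ',']

-- A's bare-run condition: not whitespace and not punctuation
def pvKeep (c : Char) : Bool := !(PySem.Chars.isspace c) && !(pvPunct.contains c)

-- A's inner string-scanning while loop: returns (buf, remainder after the closing quote);
-- none exactly where Python's while loop falls off the end and A raises _RelaxedParserError
def pvScanStr (q : Char) : List Char → Option (List Char × List Char)
  | [] => none
  | c :: rest =>
    if c = '\\' then
      match rest with
      | d :: rest' => (pvScanStr q rest').map (fun p => (d :: p.1, p.2))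
      | [] => none          -- '\' as last char: A appends it, then the loop ends unterminated
    else if c = q then some ([], rest)
    else (pvScanStr q rest).map (fun p => (c :: p.1, p.2))

theorem pvScanStr_length_aux : ∀ (n : Nat) (cs : List Char), cs.length ≤ n →
    ∀ (q : Char) (buf r : List Char), pvScanStr q cs = some (buf, r) → r.length < cs.length := by
  intro n
  induction n with
  | zero =>
    intro cs hn q buf r h
    have : cs = [] := by cases cs <;> simp_all
    subst this; simp [pvScanStr] at h
  | succ n ih =>
    intro cs hn q buf r h
    match cs with
    | [] => simp [pvScanStr] at h
    | c :: rest =>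
      rw [pvScanStr.eq_def] at h
      by_cases hc : c = '\\'
      · match rest with
        | [] => simp [hc] at h
        | d :: rest' =>
          simp only [hc, if_pos] at h
          cases hs : pvScanStr q rest' with
          | none => rw [hs] at h; simp at h
          | some p =>
            rw [hs] at h
            obtain ⟨b', r'⟩ := p
            simp at h
            have hlt := ih rest' (by simp at hn ⊢; omega) q b' r' hs
            have : r = r' := h.2.symm
            subst this; simp at hlt ⊢; omega
      · by_cases hq : c = q
        · subst hq
          simp [hc] at h
          obtain ⟨hb, hr⟩ := h
          subst hr; simp
        · simp only [if_neg hc, if_neg hq] at h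
          cases hs : pvScanStr q rest with
          | none => rw [hs] at h; simp at h
          | some p =>
            rw [hs] at h
            obtain ⟨b', r'⟩ := p
            simp at h
            have hlt := ih rest (by simp at hn; omega) q b' r' hs
            have : r = r' := h.2.symm
            subst this; simp at hlt ⊢; omega

theorem pvScanStr_length (q : Char) (cs buf r : List Char)
    (h : pvScanStr q cs = some (buf, r)) : r.length < cs.length :=
  pvScanStr_length_aux cs.length cs le_rfl q buf r h

-- A's outer while loop, step for step: skip space / emit punct / scan quoted string / take a bare run
def pvTokA : List Char → List (String × String)
  | [] => []
  | c :: rest =>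
    if PySem.Chars.isspace c then pvTokA rest
    else if pvPunct.contains c then (String.ofList [c], String.ofList [c]) :: pvTokA rest
    else if c = '"' ∨ c = '\'' then
      match h : pvScanStr c rest with
      | some (buf, r) => ("STRING", String.ofList buf) :: pvTokA r
      | none => []          -- Python raises _RelaxedParserError here; excluded by Pre_
    else
      ("BARE", String.ofList (c :: rest.takeWhile pvKeep)) :: pvTokA (rest.dropWhile pvKeep)
termination_by cs => cs.length
decreasing_by
  · simp
  · simp
  · have := pvScanStr_length c rest buf r h; simp; omega
  · have := rest.length_dropWhile_le pvKeep; simp; omega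

def tokenize_relaxed_py (raw : String) : List (String × String) := pvTokA raw.toList

-- ===== PORT B =====
inductive PvMode : Type
  | N | S | E
deriving DecidableEq, Repr

-- B's per-character state machine: (tokens, mode, quote, buf, bare)
def pvStepB : (List (String × String) × PvMode × Char × List Char × List Char) → Char →
    (List (String × String) × PvMode × Char × List Char × List Char)
  | (toks, PvMode.E, q, buf, bare), ch => (toks, PvMode.S, q, buf ++ [ch], bare)
  | (toks, PvMode.S, q, buf, bare), ch =>
      if ch = '\\' then (toks, PvMode.E, q, buf, bare)
      else if ch = q then (toks ++ [("STRING", String.ofList buf)], PvMode.N, q, buf, bare)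
      else (toks, PvMode.S, q, buf ++ [ch], bare)
  | (toks, PvMode.N, q, buf, bare), ch =>
      if PySem.Chars.isspace ch || pvPunct.contains ch then
        let toks1 := if bare ≠ [] then toks ++ [("BARE", String.ofList bare)] else toks
        let toks2 := if pvPunct.contains ch then toks1 ++ [(String.ofList [ch], String.ofList [ch])] else toks1
        (toks2, PvMode.N, q, buf, [])
      else if bare = [] ∧ (ch = '"' ∨ ch = '\'') then (toks, PvMode.S, ch, [], bare)
      else (toks, PvMode.N, q, buf, bare ++ [ch])

-- B's epilogue: an unterminated string raises (excluded by Pre_), else flush a pending bare run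
def pvFinishB (st : List (String × String) × PvMode × Char × List Char × List Char) :
    List (String × String) :=
  match st with
  | (toks, mode, _, _, bare) =>
    if mode ≠ PvMode.N then []
    else if bare ≠ [] then toks ++ [("BARE", String.ofList bare)] else toks

def tokenize_relaxed_py_alt (raw : String) : List (String × String) :=
  pvFinishB (raw.toList.foldl pvStepB ([], PvMode.N, ' ', [], []))

-- ===== PRECONDITION & SPEC =====
-- states of the quote-closure scanner: top level / inside a bare run / inside a q-string / after '\'
inductive PvQSt : Type
  | T | B | S (q : Char) | E (q : Char)
deriving DecidableEq, Repr

-- one-pass check that every quoted string that is OPENED (only at token starts) is also closed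
def pvQ : PvQSt → List Char → Bool
  | PvQSt.T, [] => true
  | PvQSt.B, [] => true
  | PvQSt.S _, [] => false
  | PvQSt.E _, [] => false
  | PvQSt.T, c :: rest =>
      if PySem.Chars.isspace c then pvQ PvQSt.T rest
      else if pvPunct.contains c then pvQ PvQSt.T rest
      else if c = '"' ∨ c = '\'' then pvQ (PvQSt.S c) rest
      else pvQ PvQSt.B rest
  | PvQSt.B, c :: rest => if pvKeep c then pvQ PvQSt.B rest else pvQ PvQSt.T rest
  | PvQSt.S q, c :: rest =>
      if c = '\\' then pvQ (PvQSt.E q) rest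
      else if c = q then pvQ PvQSt.T rest
      else pvQ (PvQSt.S q) rest
  | PvQSt.E q, _ :: rest => pvQ (PvQSt.S q) rest

-- Pre_ excludes exactly the inputs containing an unterminated quoted string (including a trailing
-- backslash inside one), on which A raises _RelaxedParserError (and B raises it too).
def Pre_tokenize_relaxed_py (raw : String) : Prop := pvQ PvQSt.T raw.toList = true
instance (raw : String) : Decidable (Pre_tokenize_relaxed_py raw) := by
  unfold Pre_tokenize_relaxed_py; infer_instance

def pvWitness_tokenize_relaxed_py : String := "{k: 'a\\tb', \"x\": [1, two]}"

def Spec_tokenize_relaxed_py (raw : String) (out : List (String × String)) : Prop :=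
  out = tokenize_relaxed_py_alt raw
instance (raw : String) (out : List (String × String)) : Decidable (Spec_tokenize_relaxed_py raw out) := by
  unfold Spec_tokenize_relaxed_py; infer_instance

-- ===== CLAIM (what is proved, stated in full; the proofs are below) =====
def Claim_equal_tokenize_relaxed_py : Prop := ∀ (raw : String), Dom_tokenize_relaxed_py raw →
  Pre_tokenize_relaxed_py raw → Spec_tokenize_relaxed_py raw (tokenize_relaxed_py raw)

-- ===== LEMMAS AND PROOFS =====

theorem tokenize_relaxed_py_witness :
    Dom_tokenize_relaxed_py pvWitness_tokenize_relaxed_py ∧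
    Pre_tokenize_relaxed_py pvWitness_tokenize_relaxed_py := by decide

theorem pv_space_not_punct (c : Char) (h : PySem.Chars.isspace c = true) :
    pvPunct.contains c = false := by
  by_contra hc
  have hm : c ∈ pvPunct := by simpa using hc
  fin_cases hm <;> exact absurd h (by decide)

theorem pv_punct_not_space (c : Char) (h : pvPunct.contains c = true) :
    PySem.Chars.isspace c = false := by
  have hm : c ∈ pvPunct := by simpa using h
  fin_cases hm <;> decide

theorem pv_keep_split (c : Char) (h : pvKeep c = false) :
    PySem.Chars.isspace c = true ∨ pvPunct.contains c = true := by
  by_cases h1 : PySem.Chars.isspace c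
  · exact Or.inl h1
  · right
    simp [pvKeep, h1] at h
    simpa using h

theorem pv_keep_parts (c : Char) (h : pvKeep c = true) :
    PySem.Chars.isspace c = false ∧ pvPunct.contains c = false := by
  simp [pvKeep] at h
  exact ⟨by simpa using h.1, by simpa using h.2⟩

-- the first char surviving dropWhile fails the predicate
theorem pv_dropWhile_head (p : Char → Bool) : ∀ (l : List Char) (c : Char),
    (l.dropWhile p).head? = some c → p c = false := by
  intro l
  induction l with
  | nil => intro c h; simp at h
  | cons a l ih =>
    intro c h
    by_cases hp : p a
    · rw [List.dropWhile_cons_of_pos hp] at h; exact ih c h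
    · rw [List.dropWhile_cons_of_neg hp] at h
      simp at h; subst h; simpa using hp

-- pvQ in bare mode ignores a keep-run
theorem pvQB_chunk : ∀ (chunk rest : List Char), (∀ c ∈ chunk, pvKeep c = true) →
    pvQ PvQSt.B (chunk ++ rest) = pvQ PvQSt.B rest := by
  intro chunk
  induction chunk with
  | nil => simp
  | cons c chunk ih =>
    intro rest h
    have hc : pvKeep c = true := h c (by simp)
    simp only [List.cons_append, pvQ, hc, if_pos]
    exact ih rest (fun d hd => h d (by simp [hd]))

-- at a non-keep boundary (or the end) bare mode and top mode agree
theorem pvQB_toT : ∀ (rest : List Char), (∀ c, rest.head? = some c → pvKeep c = false) →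
    pvQ PvQSt.B rest = pvQ PvQSt.T rest := by
  intro rest h
  match rest with
  | [] => rfl
  | d :: r =>
    have hd : pvKeep d = false := h d rfl
    rcases pv_keep_split d hd with hsp | hpt
    · simp [pvQ, hd, hsp]
    · have hm : d ∈ pvPunct := by simpa using hpt
      simp [pvQ, hd, hm, pv_punct_not_space d hpt]

-- a closed q-string: A's scan succeeds and the remainder is again quote-closed
theorem pvQS_scan : ∀ (n : Nat) (cs : List Char), cs.length ≤ n → ∀ (q : Char),
    pvQ (PvQSt.S q) cs = true →
    ∃ buf r, pvScanStr q cs = some (buf, r) ∧ pvQ PvQSt.T r = true := by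
  intro n
  induction n with
  | zero =>
    intro cs hn q h
    have : cs = [] := by cases cs <;> simp_all
    subst this; simp [pvQ] at h
  | succ n ih =>
    intro cs hn q h
    match cs with
    | [] => simp [pvQ] at h
    | c :: rest =>
      by_cases hc : c = '\\'
      · subst hc
        simp only [pvQ, if_pos rfl] at h
        match rest with
        | [] => simp [pvQ] at h
        | d :: rest' =>
          simp only [pvQ] at h
          obtain ⟨buf, r, hs, hr⟩ := ih rest' (by simp at hn ⊢; omega) q h
          exact ⟨d :: buf, r, by rw [pvScanStr.eq_def]; simp [hs], hr⟩
      · by_cases hq : c = q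
        · subst hq
          simp only [pvQ, if_neg hc] at h
          exact ⟨[], rest, by rw [pvScanStr.eq_def]; simp [hc], h⟩
        · simp only [pvQ, if_neg hc, if_neg hq] at h
          obtain ⟨buf, r, hs, hr⟩ := ih rest (by simp at hn; omega) q h
          exact ⟨c :: buf, r, by rw [pvScanStr.eq_def]; simp [hc, hq, hs], hr⟩

-- B's fold through a quoted string: consumes exactly A's scan and emits the STRING token
theorem pvFold_string : ∀ (n : Nat) (cs : List Char), cs.length ≤ n →
    ∀ (q : Char) (buf r : List Char), pvScanStr q cs = some (buf, r) → q ≠ '\\' →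
    ∀ (toks : List (String × String)) (acc bare : List Char),
    cs.foldl pvStepB (toks, PvMode.S, q, acc, bare) =
      r.foldl pvStepB (toks ++ [("STRING", String.ofList (acc ++ buf))], PvMode.N, q, acc ++ buf, bare) := by
  intro n
  induction n with
  | zero =>
    intro cs hn q buf r h _
    have : cs = [] := by cases cs <;> simp_all
    subst this; simp [pvScanStr] at h
  | succ n ih =>
    intro cs hn q buf r h hqb
    match cs with
    | [] => simp [pvScanStr] at h
    | c :: rest =>
      rw [pvScanStr.eq_def] at h
      by_cases hc : c = '\\'
      · subst hc
        match rest with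
        | [] => simp at h
        | d :: rest' =>
          simp only [if_pos rfl] at h
          cases hs : pvScanStr q rest' with
          | none => rw [hs] at h; simp at h
          | some p =>
            rw [hs] at h
            obtain ⟨b', r'⟩ := p
            simp at h
            obtain ⟨hb, hr⟩ := h
            subst hb; subst hr
            intro toks acc bare
            have step1 : pvStepB (toks, PvMode.S, q, acc, bare) '\\' = (toks, PvMode.E, q, acc, bare) := by
              simp [pvStepB]
            have step2 : pvStepB (toks, PvMode.E, q, acc, bare) d = (toks, PvMode.S, q, acc ++ [d], bare) := by
              simp [pvStepB]
            simp only [List.foldl_cons, step1, step2]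
            have := ih rest' (by simp at hn ⊢; omega) q b' r' hs hqb toks (acc ++ [d]) bare
            rw [this]; simp
      · by_cases hq : c = q
        · subst hq
          simp [hc] at h
          obtain ⟨hb, hr⟩ := h
          subst hb; subst hr
          intro toks acc bare
          have step1 : pvStepB (toks, PvMode.S, c, acc, bare) c =
              (toks ++ [("STRING", String.ofList acc)], PvMode.N, c, acc, bare) := by
            simp [pvStepB, hc]
          simp only [List.foldl_cons, step1]; simp
        · simp only [if_neg hc, if_neg hq] at h
          cases hs : pvScanStr q rest with
          | none => rw [hs] at h; simp at h
          | some p =>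
            rw [hs] at h
            obtain ⟨b', r'⟩ := p
            simp at h
            obtain ⟨hb, hr⟩ := h
            subst hb; subst hr
            intro toks acc bare
            have step1 : pvStepB (toks, PvMode.S, q, acc, bare) c = (toks, PvMode.S, q, acc ++ [c], bare) := by
              simp [pvStepB, hc, hq]
            simp only [List.foldl_cons, step1]
            have := ih rest (by simp at hn; omega) q b' r' hs hqb toks (acc ++ [c]) bare
            rw [this]; simp

-- B's fold through a run of bare characters just accumulates them
theorem pvFold_bare : ∀ (chunk rest : List Char), (∀ c ∈ chunk, pvKeep c = true) →
    ∀ (toks : List (String × String)) (q : Char) (buf bare : List Char), bare ≠ [] →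
    (chunk ++ rest).foldl pvStepB (toks, PvMode.N, q, buf, bare) =
      rest.foldl pvStepB (toks, PvMode.N, q, buf, bare ++ chunk) := by
  intro chunk
  induction chunk with
  | nil => simp
  | cons c chunk ih =>
    intro rest h toks q buf bare hb
    have hc : pvKeep c = true := h c (by simp)
    obtain ⟨hsp, hpt⟩ := pv_keep_parts c hc
    have hm : c ∉ pvPunct := by simpa using hpt
    have step1 : pvStepB (toks, PvMode.N, q, buf, bare) c = (toks, PvMode.N, q, buf, bare ++ [c]) := by
      simp [pvStepB, hsp, hm, hb]
    simp only [List.cons_append, List.foldl_cons, step1]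
    rw [ih rest (fun d hd => h d (by simp [hd])) toks q buf (bare ++ [c]) (by simp)]
    simp

-- main invariant: B's fold from normal mode computes toks ++ (pending bare) ++ A's tokens
theorem pvMain : ∀ (n : Nat) (cs : List Char), cs.length ≤ n → pvQ PvQSt.T cs = true →
    ∀ (toks : List (String × String)) (q : Char) (buf bare : List Char),
    (bare = [] ∨ ∀ c, cs.head? = some c → pvKeep c = false) →
    pvFinishB (cs.foldl pvStepB (toks, PvMode.N, q, buf, bare)) =
      toks ++ (if bare = [] then [] else [("BARE", String.ofList bare)]) ++ pvTokA cs := by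
  intro n
  induction n with
  | zero =>
    intro cs hn hq toks q buf bare hbare
    have : cs = [] := by cases cs <;> simp_all
    subst this
    rw [pvTokA.eq_def]
    by_cases hb : bare = [] <;> simp [pvFinishB, hb]
  | succ n ih =>
    intro cs hn hq toks q buf bare hbare
    match cs with
    | [] =>
      rw [pvTokA.eq_def]
      by_cases hb : bare = [] <;> simp [pvFinishB, hb]
    | c :: rest =>
      by_cases hsp : PySem.Chars.isspace c = true
      · -- whitespace: both sides skip (B flushes a pending bare run first)
        have hpt := pv_space_not_punct c hsp
        have hm : c ∉ pvPunct := by simpa using hpt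
        have step1 : pvStepB (toks, PvMode.N, q, buf, bare) c =
            ((if bare = [] then toks else toks ++ [("BARE", String.ofList bare)]), PvMode.N, q, buf, []) := by
          by_cases hb : bare = [] <;> simp [pvStepB, hsp, hm, hb]
        have hq' : pvQ PvQSt.T rest = true := by simpa [pvQ, hsp] using hq
        simp only [List.foldl_cons, step1]
        rw [ih rest (by simp at hn; omega) hq' _ q buf [] (Or.inl rfl)]
        have htok : pvTokA (c :: rest) = pvTokA rest := by
          rw [pvTokA.eq_def]; simp [hsp]
        rw [htok]
        by_cases hb : bare = [] <;> simp [hb]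
      · by_cases hpt : pvPunct.contains c = true
        · -- punctuation: both sides emit (c, c)
          have hm : c ∈ pvPunct := by simpa using hpt
          have step1 : pvStepB (toks, PvMode.N, q, buf, bare) c =
              ((if bare = [] then toks else toks ++ [("BARE", String.ofList bare)]) ++
                [(String.ofList [c], String.ofList [c])], PvMode.N, q, buf, []) := by
            by_cases hb : bare = [] <;> simp [pvStepB, hsp, hm, hb]
          have hq' : pvQ PvQSt.T rest = true := by simpa [pvQ, hsp, hm] using hq
          simp only [List.foldl_cons, step1]
          rw [ih rest (by simp at hn; omega) hq' _ q buf [] (Or.inl rfl)]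
          have htok : pvTokA (c :: rest) =
              (String.ofList [c], String.ofList [c]) :: pvTokA rest := by
            rw [pvTokA.eq_def]; simp [hsp, hm]
          rw [htok]
          by_cases hb : bare = [] <;> simp [hb]
        · have hpt' : pvPunct.contains c = false := by simpa using hpt
          have hm : c ∉ pvPunct := by simpa using hpt'
          have hkeep : pvKeep c = true := by simp [pvKeep, hsp, hm]
          have hbare' : bare = [] := by
            rcases hbare with hb | hb
            · exact hb
            · exact absurd (hb c rfl) (by simp [hkeep])
          subst hbare'
          by_cases hc3 : c = '"' ∨ c = '\''
          · -- quoted string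
            have step1 : pvStepB (toks, PvMode.N, q, buf, []) c = (toks, PvMode.S, c, [], []) := by
              rcases hc3 with rfl | rfl <;> simp [pvStepB, hsp, hm]
            have hqS : pvQ (PvQSt.S c) rest = true := by
              simpa [pvQ, hsp, hm, hc3] using hq
            obtain ⟨sbuf, r, hscan, hqr⟩ := pvQS_scan rest.length rest le_rfl c hqS
            have hqb : c ≠ '\\' := by rcases hc3 with rfl | rfl <;> decide
            have hfold := pvFold_string rest.length rest le_rfl c sbuf r hscan hqb toks [] []
            simp only [List.nil_append] at hfold
            have hrlen := pvScanStr_length c rest sbuf r hscan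
            simp only [List.foldl_cons, step1, hfold]
            rw [ih r (by simp at hn; omega) hqr _ c sbuf [] (Or.inl rfl)]
            have htok : pvTokA (c :: rest) = ("STRING", String.ofList sbuf) :: pvTokA r := by
              rw [pvTokA.eq_def]
              simp [hsp, hm, hc3]
              split <;> rename_i heq <;> rw [hscan] at heq
              · simp only [Option.some.injEq, Prod.mk.injEq] at heq
                obtain ⟨h1, h2⟩ := heq
                subst h1; subst h2; simp
              · simp at heq
            rw [htok]
            simp
          · -- bare run
            have step1 : pvStepB (toks, PvMode.N, q, buf, []) c = (toks, PvMode.N, q, buf, [c]) := by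
              simp [pvStepB, hsp, hm, hc3]
            have hqB : pvQ PvQSt.B rest = true := by
              simpa [pvQ, hsp, hm, hc3] using hq
            have hchunk : ∀ d ∈ rest.takeWhile pvKeep, pvKeep d = true :=
              fun d hd => List.mem_takeWhile_imp hd
            have hsplit : rest = rest.takeWhile pvKeep ++ rest.dropWhile pvKeep :=
              (List.takeWhile_append_dropWhile).symm
            have hhead : ∀ d, (rest.dropWhile pvKeep).head? = some d → pvKeep d = false :=
              fun d hd => pv_dropWhile_head pvKeep rest d hd
            have hqdrop : pvQ PvQSt.T (rest.dropWhile pvKeep) = true := by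
              have h1 : pvQ PvQSt.B (rest.takeWhile pvKeep ++ rest.dropWhile pvKeep) = true := by
                rw [← hsplit]; exact hqB
              rw [pvQB_chunk _ _ hchunk, pvQB_toT _ hhead] at h1
              exact h1
            have hfold := pvFold_bare (rest.takeWhile pvKeep) (rest.dropWhile pvKeep) hchunk
              toks q buf [c] (by simp)
            simp only [List.foldl_cons, step1]
            conv_lhs => rw [hsplit]
            rw [hfold]
            have hlen : (rest.dropWhile pvKeep).length ≤ n := by
              have := rest.length_dropWhile_le pvKeep; simp at hn; omega
            rw [ih (rest.dropWhile pvKeep) hlen hqdrop _ q buf ([c] ++ rest.takeWhile pvKeep)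
              (Or.inr hhead)]
            have htok : pvTokA (c :: rest) =
                ("BARE", String.ofList (c :: rest.takeWhile pvKeep)) ::
                  pvTokA (rest.dropWhile pvKeep) := by
              rw [pvTokA.eq_def]; simp [hsp, hm, hc3]
            rw [htok]
            simp

-- ===== VERDICT (by name: the statement is the Claim_ definition above) =====
theorem tokenize_relaxed_py_spec : Claim_equal_tokenize_relaxed_py := by
  intro raw _ hpre
  unfold Spec_tokenize_relaxed_py tokenize_relaxed_py tokenize_relaxed_py_alt
  have := pvMain raw.toList.length raw.toList le_rfl hpre [] ' ' [] [] (Or.inl rfl)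
  simp at this
  exact this.symm
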